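-- pv_equiv track=rewrite | github.com/teleprint-me/archive | archive/tools/filter.py | filter_csv_by_unique_values
-- ===== SOURCE A (Python) =====
-- def filter_csv_by_unique_values(
--     csv_table: list[list[str]],
--     column: int = 0,
--     reverse: bool = False,
-- ) -> list[str]:
--     """Get a list of unique values in a column of the given CSV table.
--
--     Args:
--         csv_table: The CSV table to get the unique values from.
--         column: The index of the column to filter unique values by.
--         reverse: Sort in ascending order when False and descending when True.
--
--     Returns:
--         A list of unique values in the specified column of the CSV table.
--     """
--     try:
--         return sorted(
--             list(set(row[column] for row in csv_table[1:])), reverse=reverse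
--         )
--     except (IndexError,):
--         return []
-- ===== SOURCE B (Python) =====
-- def filter_csv_by_unique_values(
--     csv_table: list[list[str]],
--     column: int = 0,
--     reverse: bool = False,
-- ) -> list[str]:
--     """Sorted unique values of a CSV column: sort first, then drop adjacent duplicates."""
--     try:
--         vals = [row[column] for row in csv_table[1:]]
--     except IndexError:
--         return []
--     ordered = sorted(vals, reverse=reverse)
--     out = []
--     prev = None
--     first = True
--     for v in ordered:
--         if first or v != prev:
--             out.append(v)
--             prev = v
--             first = False
--     return out
-- ===== Notes on version B (the rewrite author's own statement) =====
-- stated objective: alternative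
-- what changed: Instead of building a set of the column values and sorting it, B collects the raw column values, sorts them with reverse=reverse, and deduplicates in one linear scan by skipping elements equal to the previously kept one.
import Mathlib
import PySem

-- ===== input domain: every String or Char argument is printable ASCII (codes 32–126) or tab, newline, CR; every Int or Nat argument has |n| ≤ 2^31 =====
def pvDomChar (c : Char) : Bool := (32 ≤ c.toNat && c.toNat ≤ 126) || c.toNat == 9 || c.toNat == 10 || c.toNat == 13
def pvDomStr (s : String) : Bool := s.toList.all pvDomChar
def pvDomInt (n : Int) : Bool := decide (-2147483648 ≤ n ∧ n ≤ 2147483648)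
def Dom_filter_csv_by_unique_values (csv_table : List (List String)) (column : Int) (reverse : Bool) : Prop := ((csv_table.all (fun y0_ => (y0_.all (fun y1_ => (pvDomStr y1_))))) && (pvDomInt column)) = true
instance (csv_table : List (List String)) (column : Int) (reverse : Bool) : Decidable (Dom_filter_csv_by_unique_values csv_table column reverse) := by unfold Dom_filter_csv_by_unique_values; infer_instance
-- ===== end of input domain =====

-- B sorts the raw column values and removes adjacent duplicates in one scan, instead of A's set-dedup-then-sort; same output, proved equal on all inputs.


-- ===== PORT A =====
-- 'row[column] for row in rows': some list of the values, or none at the first row where row[column] raises IndexError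
def pvColVals? (rows : List (List String)) (column : Int) : Option (List String) :=
  match rows with
  | [] => some []
  | r :: rs =>
    match PySem.List.pyGet? r column with
    | none => none
    | some v => (pvColVals? rs column).map (fun vs => v :: vs)

-- A: sorted(list(set(row[column] for row in csv_table[1:])), reverse=reverse), except IndexError -> []
def filter_csv_by_unique_values (csv_table : List (List String)) (column : Int) (reverse : Bool) : List String :=
  match pvColVals? (PySem.List.slice csv_table (some 1) none) column with
  | none => []
  | some vals => PySem.List.sorted (PySem.Set.ofList vals) (fun x => x) reverse

-- ===== PORT B =====
-- the scan 'keep v when it is the first element or differs from the previously kept one'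
def pvDedupAdjFrom (prev : String) (l : List String) : List String :=
  match l with
  | [] => []
  | v :: vs => if v = prev then pvDedupAdjFrom prev vs else v :: pvDedupAdjFrom v vs

def pvDedupAdj (l : List String) : List String :=
  match l with
  | [] => []
  | v :: vs => v :: pvDedupAdjFrom v vs

-- B: vals = [row[column] for row in csv_table[1:]] (IndexError -> []); sort vals; drop adjacent duplicates
def filter_csv_by_unique_values_alt (csv_table : List (List String)) (column : Int) (reverse : Bool) : List String :=
  match pvColVals? (PySem.List.slice csv_table (some 1) none) column with
  | none => []
  | some vals => pvDedupAdj (PySem.List.sorted vals (fun x => x) reverse)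

-- ===== PRECONDITION & SPEC =====
def Spec_filter_csv_by_unique_values (csv_table : List (List String)) (column : Int) (reverse : Bool) (out : List String) : Prop := out = filter_csv_by_unique_values_alt csv_table column reverse
instance (csv_table : List (List String)) (column : Int) (reverse : Bool) (out : List String) : Decidable (Spec_filter_csv_by_unique_values csv_table column reverse out) := by unfold Spec_filter_csv_by_unique_values; infer_instance

-- ===== CLAIM (what is proved, stated in full; the proofs are below) =====
def Claim_equal_filter_csv_by_unique_values : Prop := ∀ (csv_table : List (List String)) (column : Int) (reverse : Bool), Dom_filter_csv_by_unique_values csv_table column reverse → Spec_filter_csv_by_unique_values csv_table column reverse (filter_csv_by_unique_values csv_table column reverse)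

-- ===== LEMMAS AND PROOFS =====

-- On a list that is R-sorted below prev (R an antisymmetric relation, i.e. ≤ or ≥ on String),
-- the adjacent-dedup scan keeps exactly the elements ≠ prev, each once, strictly in R-order.
theorem pvDedupAdjFrom_props (R : String → String → Prop)
    (hanti : ∀ a b, R a b → R b a → a = b) :
    ∀ (l : List String) (prev : String), l.Pairwise R → (∀ y ∈ l, R prev y) →
      (pvDedupAdjFrom prev l).Pairwise (fun a b => R a b ∧ a ≠ b) ∧
      (∀ x, x ∈ pvDedupAdjFrom prev l ↔ (x ∈ l ∧ x ≠ prev)) := by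
  intro l
  induction l with
  | nil => intro prev _ _; simp [pvDedupAdjFrom]
  | cons y ys ih =>
    intro prev hpw hlow
    have hys : ys.Pairwise R := hpw.of_cons
    have hy_le : ∀ z ∈ ys, R y z := fun z hz => List.rel_of_pairwise_cons hpw hz
    by_cases hyp : y = prev
    · subst hyp
      have := ih y hys hy_le
      simp only [pvDedupAdjFrom, if_true]
      refine ⟨this.1, fun x => ?_⟩
      rw [this.2 x]
      constructor
      · rintro ⟨hx, hne⟩; exact ⟨List.mem_cons_of_mem _ hx, hne⟩
      · rintro ⟨hx, hne⟩
        rcases List.mem_cons.mp hx with h | h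
        · exact absurd h hne
        · exact ⟨h, hne⟩
    · have hplow : R prev y := hlow y (List.mem_cons_self ..)
      have := ih y hys hy_le
      simp only [pvDedupAdjFrom, if_neg hyp]
      constructor
      · refine List.pairwise_cons.mpr ⟨?_, this.1⟩
        intro z hz
        have hz' := (this.2 z).mp hz
        exact ⟨hy_le z hz'.1, Ne.symm hz'.2⟩
      · intro x
        rw [List.mem_cons, this.2 x, List.mem_cons]
        constructor
        · rintro (rfl | ⟨hx, hne⟩)
          · exact ⟨Or.inl rfl, hyp⟩
          · refine ⟨Or.inr hx, ?_⟩
            intro hxp; subst hxp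
            exact hyp (hanti y x (hy_le x hx) hplow)
        · rintro ⟨(rfl | hx), hnp⟩
          · exact Or.inl rfl
          · by_cases hxy : x = y
            · exact Or.inl hxy
            · exact Or.inr ⟨hx, hxy⟩

theorem pvDedupAdj_props (R : String → String → Prop)
    (hanti : ∀ a b, R a b → R b a → a = b)
    (l : List String) (hpw : l.Pairwise R) :
    (pvDedupAdj l).Pairwise (fun a b => R a b ∧ a ≠ b) ∧
    (∀ x, x ∈ pvDedupAdj l ↔ x ∈ l) := by
  cases l with
  | nil => simp [pvDedupAdj]
  | cons y ys =>
    have h := pvDedupAdjFrom_props R hanti ys y hpw.of_cons (fun z hz => List.rel_of_pairwise_cons hpw hz)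
    simp only [pvDedupAdj]
    constructor
    · refine List.pairwise_cons.mpr ⟨?_, h.1⟩
      intro z hz
      have hz' := (h.2 z).mp hz
      exact ⟨List.rel_of_pairwise_cons hpw hz'.1, Ne.symm hz'.2⟩
    · intro x
      rw [List.mem_cons, h.2 x, List.mem_cons]
      constructor
      · rintro (rfl | ⟨hx, _⟩)
        · exact Or.inl rfl
        · exact Or.inr hx
      · rintro (rfl | hx)
        · exact Or.inl rfl
        · by_cases hxy : x = y
          · exact Or.inl hxy
          · exact Or.inr ⟨hx, hxy⟩

-- the core equality: sorting the distinct values = sorting all values then dropping adjacent duplicates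
theorem sorted_set_eq_dedupAdj_sorted (vals : List String) (reverse : Bool) :
    PySem.List.sorted (PySem.Set.ofList vals) (fun x => x) reverse
      = pvDedupAdj (PySem.List.sorted vals (fun x => x) reverse) := by
  cases reverse with
  | false =>
    have hpw := PySem.List.sorted_pairwise vals (fun x => x)
    have h := pvDedupAdj_props (fun a b => a ≤ b) (fun a b => le_antisymm) _ hpw
    refine PySem.List.sorted_eq_of_perm_of_pairwise_lt _ _ _ ?_ ?_
    · refine (List.perm_ext_iff_of_nodup ?_ (PySem.Set.nodup_ofList vals)).mpr ?_
      · exact List.Pairwise.imp (fun hab => hab.2) h.1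
      · intro a
        rw [h.2 a, PySem.List.mem_sorted, PySem.Set.mem_ofList]
    · exact h.1.imp (fun hab => lt_of_le_of_ne hab.1 hab.2)
  | true =>
    have hpw := PySem.List.sorted_pairwise_rev vals (fun x => x)
    have h := pvDedupAdj_props (fun a b => b ≤ a) (fun a b hab hba => le_antisymm hba hab) _ hpw
    refine PySem.List.sorted_rev_eq_of_perm_of_pairwise_gt _ _ _ ?_ ?_
    · refine (List.perm_ext_iff_of_nodup ?_ (PySem.Set.nodup_ofList vals)).mpr ?_
      · exact List.Pairwise.imp (fun hab => hab.2) h.1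
      · intro a
        rw [h.2 a, PySem.List.mem_sorted, PySem.Set.mem_ofList]
    · exact h.1.imp (fun hab => lt_of_le_of_ne hab.1 (Ne.symm hab.2))

-- ===== VERDICT (by name: the statement is the Claim_ definition above) =====
theorem filter_csv_by_unique_values_spec : Claim_equal_filter_csv_by_unique_values := by
  intro csv_table column reverse _
  unfold Spec_filter_csv_by_unique_values
  unfold filter_csv_by_unique_values filter_csv_by_unique_values_alt
  cases pvColVals? (PySem.List.slice csv_table (some 1) none) column with
  | none => rfl
  | some vals => exact sorted_set_eq_dedupAdj_sorted vals reverse
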